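-- pv_equiv track=rewrite | github.com/guohaonan-shy/seeds-template | utils.py | convertDay
-- ===== SOURCE A (Python) =====
-- def convertDay(day: str):
--     value = 0
--     for byte in day:
--         if 0 <= ord(byte) - ord('0') <= 9:
--             value = value * 10 + ord(byte)-ord('0')
--     if value < 10:
--         return "0"+str(value)
--     return str(value)
-- ===== SOURCE B (Python) =====
-- def convertDay(day: str):
--     digits = [ord(c) - 48 for c in day if '0' <= c <= '9']
--     value = sum(d * 10 ** i for i, d in enumerate(reversed(digits)))
--     return str(value).zfill(2)
-- ===== Notes on version B (the rewrite author's own statement) =====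
-- stated objective: idiomatic
-- what changed: Replaces the guarded Horner accumulation loop and manual zero-prefix padding with a collect-then-combine decomposition: a filtering comprehension extracts the digits, the value is a positional sum over enumerate(reversed(digits)), and padding is str(value).zfill(2).
import Mathlib
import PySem

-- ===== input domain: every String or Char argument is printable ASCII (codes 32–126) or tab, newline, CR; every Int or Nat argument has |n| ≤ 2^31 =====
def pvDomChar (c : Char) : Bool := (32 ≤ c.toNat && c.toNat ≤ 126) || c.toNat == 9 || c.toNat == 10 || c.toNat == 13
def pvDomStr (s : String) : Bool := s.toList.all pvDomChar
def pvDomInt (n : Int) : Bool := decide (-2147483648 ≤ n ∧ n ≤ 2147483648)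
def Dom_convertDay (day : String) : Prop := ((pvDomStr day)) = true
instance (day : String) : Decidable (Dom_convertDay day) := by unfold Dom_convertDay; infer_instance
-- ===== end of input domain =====

-- B replaces A's guarded Horner-accumulation loop with a filter-then-positional-sum-then-zfill
-- decomposition (idiomatic; same cost). Equal return value on every input is proved below.

-- ===== PORT A =====
def convertDay (day : String) : String :=
  let value : Int := day.toList.foldl
    (fun v c => if 0 ≤ (c.toNat : Int) - 48 ∧ (c.toNat : Int) - 48 ≤ 9
                then v * 10 + ((c.toNat : Int) - 48) else v) 0
  if value < 10 then "0" ++ PySem.Int.toStr value else PySem.Int.toStr value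

-- ===== PORT B =====
def convertDay_alt (day : String) : String :=
  let digits : List Int := (day.toList.filter (fun c => '0' ≤ c && c ≤ '9')).map
    (fun c => (c.toNat : Int) - 48)
  -- `10 ** i` is ported as `10 ^ i.toNat`: exact, since enumerate indices are ≥ 0
  let value : Int := (PySem.List.enumerate digits.reverse).foldl
    (fun acc p => acc + p.2 * 10 ^ p.1.toNat) 0
  PySem.Str.zfill (PySem.Int.toStr value) 2

-- ===== PRECONDITION & SPEC =====
def Spec_convertDay (day : String) (out : String) : Prop := out = convertDay_alt day
instance (day : String) (out : String) : Decidable (Spec_convertDay day out) := by unfold Spec_convertDay; infer_instance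

-- ===== CLAIM (what is proved, stated in full; the proofs are below) =====
def Claim_equal_convertDay : Prop := ∀ (day : String), Dom_convertDay day → Spec_convertDay day (convertDay day)

-- ===== LEMMAS AND PROOFS =====

-- The digit guard of A agrees with the char-range filter of B.
lemma pv_guard_iff (c : Char) :
    (0 ≤ (c.toNat : Int) - 48 ∧ (c.toNat : Int) - 48 ≤ 9) ↔ ('0' ≤ c && c ≤ '9') = true := by
  have h0 : '0'.val.toNat = 48 := rfl
  have h9 : '9'.val.toNat = 57 := rfl
  simp only [Bool.and_eq_true, decide_eq_true_eq, Char.le_def, UInt32.le_iff_toNat_le,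
    Char.toNat, h0, h9]
  omega

-- A's guarded fold over all chars = plain Horner fold over the filtered digit values.
lemma pv_fold_filter (cs : List Char) : ∀ v : Int,
    cs.foldl (fun v c => if 0 ≤ (c.toNat : Int) - 48 ∧ (c.toNat : Int) - 48 ≤ 9
                then v * 10 + ((c.toNat : Int) - 48) else v) v
    = ((cs.filter (fun c => '0' ≤ c && c ≤ '9')).map (fun c => (c.toNat : Int) - 48)).foldl
        (fun v d => v * 10 + d) v := by
  induction cs with
  | nil => intro v; rfl
  | cons c cs ih =>
    intro v
    rw [List.foldl_cons]
    by_cases h : 0 ≤ (c.toNat : Int) - 48 ∧ (c.toNat : Int) - 48 ≤ 9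
    · have hb : ('0' ≤ c && c ≤ '9') = true := (pv_guard_iff c).mp h
      rw [if_pos h]
      simp only [List.filter_cons, hb, if_pos, List.map_cons, List.foldl_cons]
      exact ih _
    · have hb : ('0' ≤ c && c ≤ '9') = false :=
        Bool.eq_false_iff.mpr (fun hb => h ((pv_guard_iff c).mpr hb))
      rw [if_neg h]
      simp only [List.filter_cons, hb, Bool.false_eq_true, if_false]
      exact ih _

-- Horner with seed v = v·10^len + Horner with seed 0.
lemma pv_horner_shift (ds : List Int) : ∀ v : Int,
    ds.foldl (fun v d => v * 10 + d) v
    = v * 10 ^ ds.length + ds.foldl (fun v d => v * 10 + d) 0 := by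
  induction ds with
  | nil => intro v; simp
  | cons d ds ih =>
    intro v
    rw [List.foldl_cons, List.foldl_cons, ih (v * 10 + d), ih (0 * 10 + d), List.length_cons]
    ring

-- Horner fold = B's positional sum over the reversed digit list.
lemma pv_horner_eq_possum (ds : List Int) :
    ds.foldl (fun v d => v * 10 + d) 0
    = (PySem.List.enumerate ds.reverse).foldl (fun acc p => acc + p.2 * 10 ^ p.1.toNat) 0 := by
  induction ds with
  | nil => simp [PySem.List.enumerate_nil]
  | cons d ds ih =>
    have hrev : (d :: ds).reverse = ds.reverse ++ [d] := by simp
    rw [hrev, PySem.List.enumerate_append]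
    simp only [List.foldl_append, List.length_reverse]
    have henum1 : PySem.List.enumerate [d] ((0:Int) + ds.length)
        = [((ds.length : Int), d)] := by
      rw [PySem.List.enumerate_cons, PySem.List.enumerate_nil]; norm_num
    rw [henum1]
    simp only [List.foldl_cons, List.foldl_nil]
    rw [← ih]
    have htn : ((ds.length : Int)).toNat = ds.length := by omega
    rw [htn, pv_horner_shift ds (0 * 10 + d)]
    ring

-- The accumulated value is nonnegative.
lemma pv_horner_nonneg (ds : List Int) (hds : ∀ d ∈ ds, 0 ≤ d) : ∀ v : Int, 0 ≤ v →
    0 ≤ ds.foldl (fun v d => v * 10 + d) v := by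
  induction ds with
  | nil => intro v hv; simpa using hv
  | cons d ds ih =>
    intro v hv
    have hd : 0 ≤ d := hds d (by simp)
    exact ih (fun x hx => hds x (by simp [hx])) (v * 10 + d) (by nlinarith)

-- toDigitsCore never shrinks and, with positive fuel, adds at least one char.
lemma pv_toDigitsCore_ge (b : Nat) : ∀ (f n : Nat) (tl : List Char), 0 < f →
    tl.length + 1 ≤ (Nat.toDigitsCore b f n tl).length := by
  intro f
  induction f with
  | zero => intro n tl h; omega
  | succ f ih =>
    intro n tl _
    simp only [Nat.toDigitsCore]
    split
    · simp
    · rcases Nat.eq_zero_or_pos f with hf | hf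
      · subst hf; simp [Nat.toDigitsCore]
      · have := ih (n / b) ((n % b).digitChar :: tl) hf
        simp only [List.length_cons] at this
        omega

lemma pv_toStr_len_ge_two (v : Int) (hv : 10 ≤ v) : 2 ≤ (PySem.Int.toChars v).length := by
  have hneg : ¬ v < 0 := by omega
  simp only [PySem.Int.toChars, if_neg hneg]
  have h10 : 10 ≤ v.toNat := by omega
  show 2 ≤ (Nat.toDigitsCore 10 (v.toNat + 1) v.toNat []).length
  have hstep : Nat.toDigitsCore 10 (v.toNat + 1) v.toNat []
      = Nat.toDigitsCore 10 v.toNat (v.toNat / 10) [(v.toNat % 10).digitChar] := by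
    simp only [Nat.toDigitsCore]
    rw [if_neg (by omega)]
  rw [hstep]
  have := pv_toDigitsCore_ge 10 v.toNat (v.toNat / 10) [(v.toNat % 10).digitChar] (by omega)
  simpa using this

-- Formatting: A's manual pad equals zfill for every nonnegative value.
lemma pv_pad_eq_zfill (v : Int) (hv : 0 ≤ v) :
    (if v < 10 then "0" ++ PySem.Int.toStr v else PySem.Int.toStr v)
    = PySem.Str.zfill (PySem.Int.toStr v) 2 := by
  by_cases h : v < 10
  · rw [if_pos h]
    interval_cases v <;> decide
  · rw [if_neg h]
    replace h : 10 ≤ v := by omega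
    apply String.toList_injective
    rw [PySem.Str.toList_zfill, PySem.Int.toList_toStr]
    have hlen : (2 : Int) ≤ ((PySem.Int.toChars v).length : Int) := by
      exact_mod_cast pv_toStr_len_ge_two v h
    simp [PySem.Chars.zfill, hlen]

-- ===== VERDICT (by name: the statement is the Claim_ definition above) =====
theorem convertDay_spec : Claim_equal_convertDay := by
  intro day _
  unfold Spec_convertDay convertDay convertDay_alt
  simp only
  rw [pv_fold_filter, ← pv_horner_eq_possum]
  apply pv_pad_eq_zfill
  apply pv_horner_nonneg _ _ 0 le_rfl
  intro d hd
  rcases List.mem_map.mp hd with ⟨c, hc, hdc⟩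
  have hg := (List.mem_filter.mp hc).2
  have := (pv_guard_iff c).mpr hg
  omega
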